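-- pv_equiv track=rewrite | github.com/Wisien999/matura-informatyka | zbiór inf/Coding/78/78-1.py | skrot
-- ===== SOURCE A (Python) =====
-- def skrot(message):
--     S = list(map(ord, "ALGORYTM"))
--     if message[-1] == "\n":
--         message = message[:-1]
--     to_fill = 8 - (len(message) % 8)
--     message = message + ("." * to_fill)
--     for start in range(0, len(message), 8):
--         for j in range(8):
--             S[j] = (S[j] + ord(message[start+j])) % 128
--     result = ""
--     for j in range(8):
--         result += chr(65 + S[j] % 26)
--     return len(message), S, result
-- ===== SOURCE B (Python) =====
-- def skrot(message):
--     if message[-1] == "\n":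
--         message = message[:-1]
--     message = message + "." * (8 - len(message) % 8)
--     S = [(ord(c0) + sum(ord(c) for c in message[j::8])) % 128
--          for j, c0 in enumerate("ALGORYTM")]
--     return len(message), S, "".join(chr(65 + s % 26) for s in S)
-- ===== Notes on version B (the rewrite author's own statement) =====
-- stated objective: faster
-- what changed: B replaces A's block-by-block loop that repeatedly updates the 8-cell state with a single column-wise comprehension: each cell is computed once as (ord of its seed char + sum of ords of the stride-8 slice of the padded message starting at j) % 128, and the result string is built by a join over S instead of an index loop; the C-level slicing and sum() avoid per-character Python-level list indexing and state writes.
import Mathlib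
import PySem

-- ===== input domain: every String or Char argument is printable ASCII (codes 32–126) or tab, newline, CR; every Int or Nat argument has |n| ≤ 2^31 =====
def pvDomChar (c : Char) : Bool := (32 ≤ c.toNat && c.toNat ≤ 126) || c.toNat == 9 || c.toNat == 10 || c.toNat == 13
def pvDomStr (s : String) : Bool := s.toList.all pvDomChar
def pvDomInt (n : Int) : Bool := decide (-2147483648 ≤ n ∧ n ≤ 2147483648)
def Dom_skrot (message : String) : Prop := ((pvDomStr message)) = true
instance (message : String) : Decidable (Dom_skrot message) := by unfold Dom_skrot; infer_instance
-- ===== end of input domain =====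

-- B computes the checksum column-wise (one strided sum per state cell) instead of A's block-by-block
-- state updates; return value proved equal on every non-empty message (A raises IndexError on "").

-- ===== PORT A =====
-- inner loop 'for j in range(8): S[j] = (S[j] + ord(message[start+j])) % 128', named as a helper
def skrotInner (msg : List Char) (S : List Int) (start : Int) : List Int :=
  (PySem.List.pyRange 0 8 1).foldl (fun S j =>
    PySem.List.pySetD S j
      (PySem.Int.mod (PySem.List.pyGetD S j 0 + ((PySem.List.pyGetD msg (start + j) ' ').toNat : Int)) 128)) S

def skrot (message : String) : Int × List Int × String :=
  match PySem.Str.pyGet? message (-1) with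
  | none => (0, [], "")  -- Python's last-character access raises IndexError on the empty string; excluded by Pre_skrot
  | some last =>
    let msg : List Char :=
      if last = '\n' then (PySem.Str.slice message none (some (-1))).toList else message.toList
    let toFill : Nat := 8 - msg.length % 8
    let msg : List Char := msg ++ List.replicate toFill '.'
    let S : List Int :=
      (PySem.List.pyRange 0 (msg.length : Int) 8).foldl (fun S start => skrotInner msg S start)
        ("ALGORYTM".toList.map (fun c => (c.toNat : Int)))
    let result : List Char :=
      (PySem.List.pyRange 0 8 1).foldl (fun r j =>
        r ++ [Char.ofNat (65 + (PySem.Int.mod (PySem.List.pyGetD S j 0) 26)).toNat]) []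
    ((msg.length : Int), S, String.ofList result)

-- ===== PORT B =====
def skrot_alt (message : String) : Int × List Int × String :=
  match PySem.Str.pyGet? message (-1) with
  | none => (0, [], "")  -- Python's last-character access raises IndexError on the empty string; excluded by Pre_skrot
  | some last =>
    let msg : List Char :=
      if last = '\n' then (PySem.Str.slice message none (some (-1))).toList else message.toList
    let msg : List Char := msg ++ List.replicate (8 - msg.length % 8) '.'
    let S : List Int :=
      (PySem.List.enumerate "ALGORYTM".toList 0).map (fun p =>
        PySem.Int.mod ((p.2.toNat : Int) +
          (((PySem.List.slice? msg (some p.1) none 8).getD []).map (fun c => (c.toNat : Int))).sum) 128)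
    ((msg.length : Int), S, String.ofList (S.map (fun s => Char.ofNat (65 + PySem.Int.mod s 26).toNat)))

-- ===== PRECONDITION & SPEC =====
-- Pre_ excludes only the empty string, on which A's last-character access raises IndexError.
def Pre_skrot (message : String) : Prop := message ≠ ""
instance (message : String) : Decidable (Pre_skrot message) := by unfold Pre_skrot; infer_instance
def pvWitness_skrot : String := ("abc")
def Spec_skrot (message : String) (out : Int × List Int × String) : Prop := out = skrot_alt message
instance (message : String) (out : Int × List Int × String) : Decidable (Spec_skrot message out) := by unfold Spec_skrot; infer_instance

-- ===== CLAIM (what is proved, stated in full; the proofs are below) =====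
def Claim_equal_skrot : Prop := ∀ (message : String), Dom_skrot message → Pre_skrot message → Spec_skrot message (skrot message)

-- ===== LEMMAS AND PROOFS =====

-- column sum: ords of the j-th character of each of the first K blocks of M
def pvCol (M : List Char) (j : Int) (K : Nat) : Int :=
  ((List.range K).map (fun (i : Nat) => ((PySem.List.pyGetD M (8 * (i : Int) + j) ' ').toNat : Int))).sum

theorem pvSet0 (a b c d e f g h v : Int) : PySem.List.pySetD [a,b,c,d,e,f,g,h] 0 v = [v,b,c,d,e,f,g,h] := rfl
theorem pvGet0 (a b c d e f g h : Int) : PySem.List.pyGetD [a,b,c,d,e,f,g,h] 0 0 = a := rfl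
theorem pvSet1 (a b c d e f g h v : Int) : PySem.List.pySetD [a,b,c,d,e,f,g,h] 1 v = [a,v,c,d,e,f,g,h] := rfl
theorem pvGet1 (a b c d e f g h : Int) : PySem.List.pyGetD [a,b,c,d,e,f,g,h] 1 0 = b := rfl
theorem pvSet2 (a b c d e f g h v : Int) : PySem.List.pySetD [a,b,c,d,e,f,g,h] 2 v = [a,b,v,d,e,f,g,h] := rfl
theorem pvGet2 (a b c d e f g h : Int) : PySem.List.pyGetD [a,b,c,d,e,f,g,h] 2 0 = c := rfl
theorem pvSet3 (a b c d e f g h v : Int) : PySem.List.pySetD [a,b,c,d,e,f,g,h] 3 v = [a,b,c,v,e,f,g,h] := rfl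
theorem pvGet3 (a b c d e f g h : Int) : PySem.List.pyGetD [a,b,c,d,e,f,g,h] 3 0 = d := rfl
theorem pvSet4 (a b c d e f g h v : Int) : PySem.List.pySetD [a,b,c,d,e,f,g,h] 4 v = [a,b,c,d,v,f,g,h] := rfl
theorem pvGet4 (a b c d e f g h : Int) : PySem.List.pyGetD [a,b,c,d,e,f,g,h] 4 0 = e := rfl
theorem pvSet5 (a b c d e f g h v : Int) : PySem.List.pySetD [a,b,c,d,e,f,g,h] 5 v = [a,b,c,d,e,v,g,h] := rfl
theorem pvGet5 (a b c d e f g h : Int) : PySem.List.pyGetD [a,b,c,d,e,f,g,h] 5 0 = f := rfl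
theorem pvSet6 (a b c d e f g h v : Int) : PySem.List.pySetD [a,b,c,d,e,f,g,h] 6 v = [a,b,c,d,e,f,v,h] := rfl
theorem pvGet6 (a b c d e f g h : Int) : PySem.List.pyGetD [a,b,c,d,e,f,g,h] 6 0 = g := rfl
theorem pvSet7 (a b c d e f g h v : Int) : PySem.List.pySetD [a,b,c,d,e,f,g,h] 7 v = [a,b,c,d,e,f,g,v] := rfl
theorem pvGet7 (a b c d e f g h : Int) : PySem.List.pyGetD [a,b,c,d,e,f,g,h] 7 0 = h := rfl

theorem pvInner8 (M : List Char) (t a b c d e f g h : Int) :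
    skrotInner M [a,b,c,d,e,f,g,h] t =
      [PySem.Int.mod (a + ((PySem.List.pyGetD M (t + 0) ' ').toNat : Int)) 128,       PySem.Int.mod (b + ((PySem.List.pyGetD M (t + 1) ' ').toNat : Int)) 128,       PySem.Int.mod (c + ((PySem.List.pyGetD M (t + 2) ' ').toNat : Int)) 128,       PySem.Int.mod (d + ((PySem.List.pyGetD M (t + 3) ' ').toNat : Int)) 128,       PySem.Int.mod (e + ((PySem.List.pyGetD M (t + 4) ' ').toNat : Int)) 128,       PySem.Int.mod (f + ((PySem.List.pyGetD M (t + 5) ' ').toNat : Int)) 128,       PySem.Int.mod (g + ((PySem.List.pyGetD M (t + 6) ' ').toNat : Int)) 128,       PySem.Int.mod (h + ((PySem.List.pyGetD M (t + 7) ' ').toNat : Int)) 128] := by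
  have hr : PySem.List.pyRange 0 8 1 = [0,1,2,3,4,5,6,7] := by decide
  simp only [skrotInner, hr, List.foldl_cons, List.foldl_nil]
  simp only [pvGet0, pvSet0, pvGet1, pvSet1, pvGet2, pvSet2, pvGet3, pvSet3, pvGet4, pvSet4, pvGet5, pvSet5, pvGet6, pvSet6, pvGet7, pvSet7]

theorem pvStep (a x c : Int) :
    PySem.Int.mod (PySem.Int.mod (a + c) 128 + x) 128 = PySem.Int.mod (a + (c + x)) 128 := by
  simp only [PySem.Int.mod_eq_emod_of_pos (by norm_num : (0:Int) < 128)]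
  omega

theorem pvColSucc (M : List Char) (j : Int) (K : Nat) :
    pvCol M j (K + 1) = pvCol M j K + ((PySem.List.pyGetD M (8 * (K : Int) + j) ' ').toNat : Int) := by
  simp [pvCol, List.range_succ]

theorem pvOuter8 (M : List Char) (K : Nat) (a b c d e f g h : Int) :
    (List.range (K + 1)).foldl (fun (S : List Int) (k : Nat) => skrotInner M S (0 + 8 * (k : Int))) [a,b,c,d,e,f,g,h] =
      [PySem.Int.mod (a + pvCol M 0 (K + 1)) 128,       PySem.Int.mod (b + pvCol M 1 (K + 1)) 128,       PySem.Int.mod (c + pvCol M 2 (K + 1)) 128,       PySem.Int.mod (d + pvCol M 3 (K + 1)) 128,       PySem.Int.mod (e + pvCol M 4 (K + 1)) 128,       PySem.Int.mod (f + pvCol M 5 (K + 1)) 128,       PySem.Int.mod (g + pvCol M 6 (K + 1)) 128,       PySem.Int.mod (h + pvCol M 7 (K + 1)) 128] := by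
  induction K with
  | zero =>
    rw [List.range_one, List.foldl_cons, List.foldl_nil, pvInner8]
    norm_num [pvCol, List.range_one]
  | succ K ih =>
    rw [List.range_succ, List.foldl_append, ih, List.foldl_cons, List.foldl_nil, pvInner8]
    have hc : ∀ j : Int, pvCol M j (K + 1 + 1)
        = pvCol M j (K + 1) + ((PySem.List.pyGetD M (8 * ((K + 1 : Nat) : Int) + j) ' ').toNat : Int) := by
      intro j; rw [pvColSucc]
    simp only [hc, zero_add, add_zero, pvStep]


theorem pvFilterMapEqMap {α β : Type} (l : List α) (g : α → Option β) (h : α → β)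
    (H : ∀ x ∈ l, g x = some (h x)) : l.filterMap g = l.map h := by
  induction l with
  | nil => rfl
  | cons y l ih => simp_all

theorem pvSlice (M : List Char) (j : Nat) (hj : j < 8) (K : Nat) (hlen : M.length = 8 * (K + 1)) :
    (PySem.List.slice? M (some (j : Int)) none 8).getD [] =
      (List.range (K + 1)).map (fun (i : Nat) => PySem.List.pyGetD M (8 * (i : Int) + (j : Int)) ' ') := by
  have h8 : ((8:Int)) ≠ 0 := by norm_num
  simp only [PySem.List.slice?, PySem.List.sliceIndices, if_neg h8]
  norm_num
  have hstart : (if (j:Int) < 0 then max ((j:Int) + (M.length:Int)) 0 else min (j:Int) (M.length:Int)) = (j:Int) := by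
    omega
  rw [hstart]
  have hlt : (j:Int) < (M.length:Int) := by omega
  rw [if_pos hlt]
  have hcount : ((((M.length:Int) - (j:Int)) + 8 - 1) / 8).toNat = K + 1 := by omega
  rw [hcount]
  apply pvFilterMapEqMap
  intro x hx
  simp only [List.mem_range] at hx
  have hn : (((j:Int) + 8 * (x:Int))).toNat = 8 * x + j := by omega
  have hlt2 : 8 * x + j < M.length := by omega
  rw [hn, List.getElem?_eq_getElem hlt2,
      PySem.List.pyGetD_of_nonneg _ _ (by positivity : (0:Int) <= 8 * (x:Int) + (j:Int))]
  have hn2 : ((8 * (x:Int) + (j:Int))).toNat = 8 * x + j := by omega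
  rw [hn2, List.getD_eq_getElem M ' ' hlt2]

theorem pvColSum (M : List Char) (j : Nat) (hj : j < 8) (K : Nat) (hlen : M.length = 8 * (K + 1)) :
    (((PySem.List.slice? M (some (j : Int)) none 8).getD []).map (fun c => ((c.toNat : Int)))).sum
      = pvCol M (j : Int) (K + 1) := by
  rw [pvSlice M j hj K hlen, List.map_map, pvCol]
  rfl

-- ===== VERDICT (by name: the statement is the Claim_ definition above) =====
theorem skrot_spec : Claim_equal_skrot := by
  intro message hdom hpre
  unfold Spec_skrot
  cases h : PySem.Str.pyGet? message (-1) with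
  | none =>
    exfalso
    apply hpre
    rw [PySem.Str.pyGet?, PySem.Chars.pyGet?_eq_listPyGet?, PySem.List.pyGet?_eq_none_iff] at h
    have : message.toList.length = 0 := by
      by_contra hne
      exact h (by constructor <;> omega)
    exact String.toList_eq_nil_iff.mp (List.length_eq_zero_iff.mp this)
  | some last =>
    simp only [skrot, skrot_alt, h]
    generalize (if last = '\n' then (PySem.Str.slice message none (some (-1))).toList else message.toList) = s0
    generalize hM : s0 ++ List.replicate (8 - s0.length % 8) '.' = M
    obtain ⟨K, hK⟩ : ∃ K, M.length = 8 * (K + 1) := by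
      have h1 : s0.length % 8 < 8 := Nat.mod_lt _ (by norm_num)
      refine ⟨s0.length / 8, ?_⟩
      rw [← hM]
      simp only [List.length_append, List.length_replicate]
      omega
    have hinit : "ALGORYTM".toList.map (fun c => ((c.toNat : Int))) = [65,76,71,79,82,89,84,77] := by decide
    have hcnt : (if (0:Int) < ((M.length : Nat) : Int) then ((((M.length : Nat) : Int) - 0 + 8 - 1) / 8).toNat else 0) = K + 1 := by
      rw [hK]; split_ifs with hc
      · push_cast; omega
      · push_cast at hc; omega
    have hrange : PySem.List.pyRange 0 ((M.length : Nat) : Int) 8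
        = (List.range (K + 1)).map (fun (k : Nat) => 0 + 8 * (k : Int)) := by
      rw [PySem.List.pyRange_of_pos _ _ (by norm_num : (0:Int) < 8), hcnt]
    rw [hinit, hrange, List.foldl_map, pvOuter8 M K]
    have henum : PySem.List.enumerate "ALGORYTM".toList 0
        = [((0:Int),'A'),(1,'L'),(2,'G'),(3,'O'),(4,'R'),(5,'Y'),(6,'T'),(7,'M')] := by decide
    rw [henum]
    simp only [List.map_cons, List.map_nil]
    have hsl : ∀ j : Nat, j < 8 →
        (((PySem.List.slice? M (some (j : Int)) none 8).getD []).map (fun c => ((c.toNat : Int)))).sum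
          = pvCol M (j : Int) (K + 1) := fun j hj => pvColSum M j hj K hK
    have e0 := hsl 0 (by norm_num); have e1 := hsl 1 (by norm_num)
    have e2 := hsl 2 (by norm_num); have e3 := hsl 3 (by norm_num)
    have e4 := hsl 4 (by norm_num); have e5 := hsl 5 (by norm_num)
    have e6 := hsl 6 (by norm_num); have e7 := hsl 7 (by norm_num)
    push_cast at e0 e1 e2 e3 e4 e5 e6 e7
    simp only [e0, e1, e2, e3, e4, e5, e6, e7]
    have hr : PySem.List.pyRange 0 8 1 = [0,1,2,3,4,5,6,7] := by decide
    rw [hr]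
    simp only [List.foldl_cons, List.foldl_nil,
      pvGet0, pvGet1, pvGet2, pvGet3, pvGet4, pvGet5, pvGet6, pvGet7]
    simp only [show ((('A'.toNat : Nat)) : Int) = 65 from by decide, show ((('L'.toNat : Nat)) : Int) = 76 from by decide, show ((('G'.toNat : Nat)) : Int) = 71 from by decide, show ((('O'.toNat : Nat)) : Int) = 79 from by decide, show ((('R'.toNat : Nat)) : Int) = 82 from by decide, show ((('Y'.toNat : Nat)) : Int) = 89 from by decide, show ((('T'.toNat : Nat)) : Int) = 84 from by decide, show ((('M'.toNat : Nat)) : Int) = 77 from by decide]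
    norm_num
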